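-- pv_equiv track=rewrite | github.com/parag1995/basic_code | kaydens_circular_array.py | kaydens
-- ===== SOURCE A (Python) =====
-- def kaydens(a):
--     max_so_far = a[0]
--     current_sum = 0
--     st=pt=ed = 0
--     for i in range(len(a)):
--         current_sum = current_sum+a[i]
--         if current_sum > max_so_far:
--             max_so_far = current_sum
--             st = pt
--             ed = i
--         if (current_sum<0):
--             current_sum = 0
--             pt=i+1
--     return max_so_far,st,ed
-- ===== SOURCE B (Python) =====
-- def kaydens(a):
--     # Two stages: generate every candidate (best sum ending at i, its start, i)
--     # from a running prefix sum and running prefix minimum, then pick the first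
--     # maximal candidate (seeded with (a[0], 0, 0)).
--     cands = []
--     p = mp = mi = 0
--     for i, x in enumerate(a):
--         p += x
--         cands.append((p - mp, mi, i))
--         if p < mp:
--             mp = p
--             mi = i + 1
--     best = (a[0], 0, 0)
--     for c in cands:
--         if c[0] > best[0]:
--             best = c
--     return best
-- ===== Notes on version B (the rewrite author's own statement) =====
-- stated objective: alternative
-- what changed: Replaces Kadane's single interleaved reset loop by two stages: a prefix-sum/prefix-minimum scan that materialises every candidate (sum, start, end) triple, followed by a separate first-maximum selection pass.
import Mathlib
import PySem

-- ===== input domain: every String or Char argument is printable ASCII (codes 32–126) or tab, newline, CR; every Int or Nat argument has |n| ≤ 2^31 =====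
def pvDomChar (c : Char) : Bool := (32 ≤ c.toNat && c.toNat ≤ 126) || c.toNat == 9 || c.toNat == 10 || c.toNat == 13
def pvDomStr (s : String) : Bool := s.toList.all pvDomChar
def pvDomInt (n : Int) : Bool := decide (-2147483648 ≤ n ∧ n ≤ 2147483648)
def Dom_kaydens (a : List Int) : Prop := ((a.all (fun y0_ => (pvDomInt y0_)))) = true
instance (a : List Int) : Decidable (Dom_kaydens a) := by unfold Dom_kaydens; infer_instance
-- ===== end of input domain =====

-- B replaces Kadane's single interleaved loop by two stages (candidate generation, then
-- first-maximum selection); objective: alternative decomposition, same O(n) cost.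

-- ===== PORT A =====
-- loop body of A: state (max_so_far, current_sum, st, pt, ed), index i
def kaydensStep (a : List Int) : (Int × Int × Int × Int × Int) → Int → (Int × Int × Int × Int × Int)
  | (mx, cur, st, pt, ed), i =>
    let cur := cur + PySem.List.pyGetD a i 0
    let (mx, st, ed) := if cur > mx then (cur, pt, i) else (mx, st, ed)
    if cur < 0 then (mx, 0, st, i + 1, ed) else (mx, cur, st, pt, ed)

def kaydens (a : List Int) : Int × Int × Int :=
  let r := (PySem.List.pyRange 0 (a.length : Int) 1).foldl (kaydensStep a)
    (PySem.List.pyGetD a 0 0, 0, 0, 0, 0)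
  (r.1, r.2.2.1, r.2.2.2.2)

-- ===== PORT B =====
-- stage 1 body: state (cands, p, mp, mi), item (i, x) from enumerate(a)
def kaydensGen (s : List (Int × Int × Int) × Int × Int × Int) (ix : Int × Int) :
    List (Int × Int × Int) × Int × Int × Int :=
  let p := s.2.1 + ix.2
  let cands := s.1 ++ [(p - s.2.2.1, s.2.2.2, ix.1)]
  if p < s.2.2.1 then (cands, p, p, ix.1 + 1) else (cands, p, s.2.2.1, s.2.2.2)

def kaydens_alt (a : List Int) : Int × Int × Int :=
  let g := (PySem.List.enumerate a).foldl kaydensGen ([], 0, 0, 0)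
  g.1.foldl (fun b c => if c.1 > b.1 then c else b) (PySem.List.pyGetD a 0 0, 0, 0)

-- ===== PRECONDITION & SPEC =====
-- Pre_ excludes only the empty list, on which Python A raises IndexError (a[0]); B raises there too.
def Pre_kaydens (a : List Int) : Prop := a ≠ []
instance (a : List Int) : Decidable (Pre_kaydens a) := by unfold Pre_kaydens; infer_instance
def pvWitness_kaydens : List Int := [1, -2, 3]

def Spec_kaydens (a : List Int) (out : Int × Int × Int) : Prop := out = kaydens_alt a
instance (a : List Int) (out : Int × Int × Int) : Decidable (Spec_kaydens a out) := by unfold Spec_kaydens; infer_instance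

-- ===== CLAIM (what is proved, stated in full; the proofs are below) =====
def Claim_equal_kaydens : Prop := ∀ (a : List Int), Dom_kaydens a → Pre_kaydens a → Spec_kaydens a (kaydens a)

-- ===== LEMMAS AND PROOFS =====

-- the candidate stream of B's first stage, written structurally for the proof
def candsOf : List Int → Int → Int → Int → Int → List (Int × Int × Int)
  | [], _, _, _, _ => []
  | x :: xs, i, p, mp, mi =>
    ((p + x) - mp, mi, i) ::
      (if p + x < mp then candsOf xs (i + 1) (p + x) (p + x) (i + 1)
       else candsOf xs (i + 1) (p + x) mp mi)

theorem gen_eq_candsOf : ∀ (xs : List Int) (i p mp mi : Int) (c0 : List (Int × Int × Int)),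
    ((PySem.List.enumerate xs i).foldl kaydensGen (c0, p, mp, mi)).1 = c0 ++ candsOf xs i p mp mi := by
  intro xs
  induction xs with
  | nil => intro i p mp mi c0; simp [candsOf, PySem.List.enumerate_nil]
  | cons x xs ih =>
    intro i p mp mi c0
    rw [PySem.List.enumerate_cons]
    simp only [List.foldl_cons, kaydensGen, candsOf]
    by_cases h : p + x < mp <;> simp only [h, if_pos, if_false, ih] <;> simp

-- main invariant: A's loop from index k projects to B's pick-fold over the candidate stream
theorem loop_agree (a : List Int) : ∀ (xs : List Int) (k : Nat), a.drop k = xs →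
    ∀ (mx cur st pt ed mp : Int), cur = (a.take k).sum - mp →
    (let r := (PySem.List.pyRange (k : Int) (a.length : Int) 1).foldl (kaydensStep a) (mx, cur, st, pt, ed)
     (r.1, r.2.2.1, r.2.2.2.2)) =
    (candsOf xs (k : Int) ((a.take k).sum) mp pt).foldl (fun b c => if c.1 > b.1 then c else b) (mx, st, ed) := by
  intro xs
  induction xs with
  | nil =>
    intro k hk mx cur st pt ed mp hcur
    have hlen : a.length ≤ k := by
      by_contra h
      have := List.drop_eq_nil_iff.mp hk
      omega
    rw [PySem.List.pyRange_one_eq_nil (by exact_mod_cast hlen)]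
    simp [candsOf]
  | cons x xs ih =>
    intro k hk mx cur st pt ed mp hcur
    have hklt : k < a.length := by
      by_contra h
      rw [List.drop_eq_nil_iff.mpr (by omega)] at hk
      simp at hk
    have hx : a[k] = x := by
      have h0 : (a.drop k)[0]'(by rw [hk]; simp) = x := by simp [hk]
      simpa using h0
    have hdrop : a.drop (k + 1) = xs := by
      have : (a.drop k).tail = a.drop (k + 1) := by
        rw [← List.drop_drop]; simp
      rw [← this, hk]; simp
    rw [PySem.List.pyRange_one_cons (by exact_mod_cast hklt)]
    simp only [List.foldl_cons, kaydensStep, candsOf, List.foldl_cons]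
    have hget : PySem.List.pyGetD a (k : Int) 0 = x := by
      rw [PySem.List.pyGetD_natCast]
      simp [List.getD_eq_getElem?_getD, List.getElem?_eq_getElem hklt, hx]
    rw [hget, hcur]
    have e1 : (a.take k).sum - mp + x = ((a.take k).sum + x) - mp := by ring
    rw [e1]
    have e2 : (((a.take k).sum + x) - mp < 0) = ((a.take k).sum + x < mp) := by
      apply propext; omega
    simp only [e2]
    have hsum : (a.take (k + 1)).sum = (a.take k).sum + x := by
      rw [List.sum_take_succ a k hklt, hx]
    have hcast : ((k : Int) + 1) = ((k + 1 : Nat) : Int) := by push_cast; ring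
    by_cases h1 : ((a.take k).sum + x) - mp > mx <;>
      by_cases h2 : (a.take k).sum + x < mp <;>
      simp only [h1, h2, if_false, if_pos, hcast]
    all_goals
      rw [show (a.take k).sum + x = (a.take (k+1)).sum from hsum.symm]
      exact ih (k + 1) hdrop _ _ _ _ _ _ (by rw [hsum]; try ring)

-- ===== VERDICT (by name: the statement is the Claim_ definition above) =====
theorem kaydens_spec : Claim_equal_kaydens := by
  intro a _ _
  unfold Spec_kaydens kaydens kaydens_alt
  dsimp only
  rw [gen_eq_candsOf]
  have h := loop_agree a a 0 (by simp) (PySem.List.pyGetD a 0 0) 0 0 0 0 0 (by simp)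
  dsimp only at h
  simpa using h
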